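-- pv_equiv track=rewrite | github.com/nonnoxer/aoc24 | day1.py | part2
-- ===== SOURCE A (Python) =====
-- def part2(l1, l2):
--     d1 = {}
--     d2 = {}
--     for n in l1:
--         d1[n] = d1.get(n, 0) + 1
--     for n in l2:
--         d2[n] = d2.get(n, 0) + 1
--
--     result = 0
--     for n, a in d1.items():
--         result += n * a * d2.get(n, 0)
--
--     return result
-- ===== SOURCE B (Python) =====
-- def part2(l1, l2):
--     return sum(n * l2.count(n) for n in l1)
-- ===== Notes on version B (the rewrite author's own statement) =====
-- stated objective: simpler
-- what changed: Drops both counter dictionaries and the distinct-key loop; sums n * l2.count(n) directly over l1, rescanning l2 per element instead of prebuilding an index.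
import Mathlib
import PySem

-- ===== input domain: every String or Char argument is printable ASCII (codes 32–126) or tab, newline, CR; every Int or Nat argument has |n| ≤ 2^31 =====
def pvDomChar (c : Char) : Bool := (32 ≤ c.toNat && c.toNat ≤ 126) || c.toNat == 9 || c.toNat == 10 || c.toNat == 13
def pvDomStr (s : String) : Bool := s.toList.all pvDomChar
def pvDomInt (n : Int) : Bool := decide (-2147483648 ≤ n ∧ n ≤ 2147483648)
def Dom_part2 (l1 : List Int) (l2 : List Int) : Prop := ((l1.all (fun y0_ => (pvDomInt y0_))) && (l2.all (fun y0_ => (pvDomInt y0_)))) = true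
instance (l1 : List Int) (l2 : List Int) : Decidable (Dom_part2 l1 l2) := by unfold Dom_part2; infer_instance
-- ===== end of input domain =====

-- B drops both counter dictionaries and the distinct-key loop: it sums n * l2.count(n)
-- directly over l1 (objective: simpler; not faster).

-- ===== PORT A =====
def part2 (l1 : List Int) (l2 : List Int) : Int :=
  let d1 := l1.foldl (fun d n => d.insert n (d.getD n 0 + 1)) PySem.Dict.empty
  let d2 := l2.foldl (fun d n => d.insert n (d.getD n 0 + 1)) PySem.Dict.empty
  d1.items.foldl (fun result p => result + p.1 * p.2 * d2.getD p.1 0) 0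

-- ===== PORT B =====
def part2_alt (l1 : List Int) (l2 : List Int) : Int :=
  (l1.map (fun n => n * (PySem.List.count l2 n : Int))).sum

-- ===== PRECONDITION & SPEC =====
def Spec_part2 (l1 : List Int) (l2 : List Int) (out : Int) : Prop := out = part2_alt l1 l2
instance (l1 : List Int) (l2 : List Int) (out : Int) : Decidable (Spec_part2 l1 l2 out) := by unfold Spec_part2; infer_instance

-- ===== CLAIM (what is proved, stated in full; the proofs are below) =====
def Claim_equal_part2 : Prop := ∀ (l1 : List Int) (l2 : List Int), Dom_part2 l1 l2 → Spec_part2 l1 l2 (part2 l1 l2)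

-- ===== LEMMAS AND PROOFS =====

-- summing f over a Nodup list that contains x, with f zeroed elsewhere, gives f x
lemma sum_map_ite_single (f : Int → Int) (x : Int) :
    ∀ (d : List Int), d.Nodup → x ∈ d →
      (d.map (fun k => if k = x then f k else 0)).sum = f x := by
  intro d
  induction d with
  | nil => intro _ hx; cases hx
  | cons a t ih =>
    intro hnd hx
    simp only [List.map_cons, List.sum_cons]
    rcases List.mem_cons.mp hx with h | h
    · subst h
      have : (t.map (fun k => if k = x then f k else 0)) = t.map (fun _ => (0 : Int)) := by
        apply List.map_congr_left
        intro y hy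
        have : y ≠ x := fun e => (List.nodup_cons.mp hnd).1 (e ▸ hy)
        simp [this]
      simp [this]
    · have hax : a ≠ x := by
        intro e; exact (List.nodup_cons.mp hnd).1 (e ▸ h)
      rw [ih (List.nodup_cons.mp hnd).2 h]
      simp [hax]

-- grouping a sum over l by value: sum over any Nodup superset of l's elements, weighted by count
lemma sum_map_eq_sum_dedup_count (f : Int → Int) :
    ∀ (l d : List Int), d.Nodup → (∀ y ∈ l, y ∈ d) →
      (l.map f).sum = (d.map (fun k => (l.count k : Int) * f k)).sum := by
  intro l
  induction l with
  | nil => intro d _ _; simp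
  | cons x t ih =>
    intro d hnd hsub
    have hx : x ∈ d := hsub x (List.mem_cons_self)
    have hsub' : ∀ y ∈ t, y ∈ d := fun y hy => hsub y (List.mem_cons_of_mem _ hy)
    simp only [List.map_cons, List.sum_cons]
    rw [ih d hnd hsub']
    have hcount : ∀ k : Int, ((x :: t).count k : Int) = (t.count k : Int) + (if k = x then 1 else 0) := by
      intro k
      by_cases h : k = x
      · subst h; simp
      · simp [h, Ne.symm h]
    have hsplit :
        (d.map (fun k => ((x :: t).count k : Int) * f k)).sum
          = (d.map (fun k => (t.count k : Int) * f k)).sum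
            + (d.map (fun k => if k = x then f k else 0)).sum := by
      rw [← List.sum_map_add]
      apply congrArg
      apply List.map_congr_left
      intro k _
      rw [hcount k]
      by_cases h : k = x <;> simp [h]
      ring
    rw [hsplit, sum_map_ite_single f x d hnd hx]
    ring

-- ===== VERDICT (by name: the statement is the Claim_ definition above) =====
theorem part2_spec : Claim_equal_part2 := by
  intro l1 l2 _
  show part2 l1 l2 = part2_alt l1 l2
  unfold part2 part2_alt
  rw [PySem.Dict.foldl_insert_getD_add_one_eq_counter,
      PySem.Dict.foldl_insert_getD_add_one_eq_counter]
  dsimp only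
  rw [PySem.Dict.items_counter, PySem.List.foldl_add]
  rw [sum_map_eq_sum_dedup_count (fun n => n * (PySem.List.count l2 n : Int)) l1
        (PySem.Set.ofList l1)
        (by rw [← PySem.List.dedup_eq_ofList]; exact PySem.List.nodup_dedup l1)
        (by intro y hy; rw [← PySem.List.dedup_eq_ofList, PySem.List.mem_dedup]; exact hy)]
  rw [List.map_map]
  simp only [zero_add, PySem.Dict.getD_counter]
  apply congrArg
  apply List.map_congr_left
  intro k _
  simp [PySem.List.count]
  ring
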